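-- pv_equiv track=rewrite | github.com/khyunchoi/Algo | Programmers/python/데브매칭 시험/s3.py | solution
-- ===== SOURCE A (Python) =====
-- def calc(s):
--     keyboard = [
--         ['q', 'w', 'e', 'r', 't', 'y', 'u', 'i', 'o'],
--         ['p', 'a', 's', 'd', 'f', 'g', 'h', 'j', 'k'],
--         ['l', 'z', 'x', 'c', 'v', 'b', 'n', 'm', '.'],
--     ]
--
--     i0, j0, i1, j1 = 0, 0, 0, 0
--     for i in range(3):
--         for j in range(9):
--             if s[0] == keyboard[i][j]:
--                 i0 = i
--                 j0 = j
--             if s[1] == keyboard[i][j]: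
--                 i1 = i
--                 j1 = j
--
--     return abs(i0 - i1) + abs(j0 - j1)
--
-- def solution(s):
--     answer = 0
--     N = len(s) - 1
--     words = [[0 for _ in range(N)] for _ in range(N)]
--
--     for j in range(N):
--         words[0][j] = calc(s[j:j+2])
--         answer += words[0][j]
--
--     for i in range(1, N):
--         for j in range(N):
--             if i+j < N:
--                 words[i][j] = words[i-1][j] + words[0][i+j]
--                 answer += words[i][j]
--
--     return answer
-- ===== SOURCE B (Python) =====
-- def solution(s):
--     keys = "qwertyuiopasdfghjklzxcvbnm."
--     pos = {c: divmod(k, 9) for k, c in enumerate(keys)}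
--     N = len(s) - 1
--     total = 0
--     for t, (x, y) in enumerate(zip(s, s[1:])):
--         xi, xj = pos.get(x, (0, 0))
--         yi, yj = pos.get(y, (0, 0))
--         d = abs(xi - yi) + abs(xj - yj)
--         total += d * (t + 1) * (N - t)
--     return total
-- ===== Notes on version B (the rewrite author's own statement) =====
-- stated objective: faster
-- what changed: Replaces the O(N^2) substring-DP matrix (each substring sum built row by row) with a single pass over adjacent character pairs, weighting each adjacent distance d[t] by the number of substrings containing it, (t+1)*(N-t).
import Mathlib
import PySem

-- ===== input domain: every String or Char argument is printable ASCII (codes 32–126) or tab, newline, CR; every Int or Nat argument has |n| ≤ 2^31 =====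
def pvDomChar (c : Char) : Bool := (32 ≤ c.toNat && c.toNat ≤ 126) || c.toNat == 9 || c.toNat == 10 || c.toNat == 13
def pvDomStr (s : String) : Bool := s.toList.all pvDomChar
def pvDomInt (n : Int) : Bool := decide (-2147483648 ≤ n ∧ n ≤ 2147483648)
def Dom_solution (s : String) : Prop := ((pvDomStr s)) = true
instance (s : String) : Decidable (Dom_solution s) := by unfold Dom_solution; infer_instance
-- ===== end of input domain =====

-- B replaces A's O(N^2) substring-sum matrix with one pass over adjacent pairs,
-- weighting each adjacent distance d[t] by the number of substrings containing it, (t+1)*(N-t).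

-- ===== PORT A =====
def pvKeyboard : List (List Char) :=
  [['q','w','e','r','t','y','u','i','o'],
   ['p','a','s','d','f','g','h','j','k'],
   ['l','z','x','c','v','b','n','m','.']]

-- calc(s): callers always pass a length-2 slice, so getD for s[0]/s[1] is exact here
def pvCalc (t : List Char) : Int :=
  let c0 := t.getD 0 ' '
  let c1 := t.getD 1 ' '
  let st := (List.range 3).foldl (fun st i =>
    (List.range 9).foldl (fun st j =>
      ((if c0 = (pvKeyboard.getD i []).getD j ' ' then ((i : Int), (j : Int)) else st.1),
       (if c1 = (pvKeyboard.getD i []).getD j ' ' then ((i : Int), (j : Int)) else st.2))) st)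
    (((0 : Int), (0 : Int)), ((0 : Int), (0 : Int)))
  |st.1.1 - st.2.1| + |st.1.2 - st.2.2|

def pvGetNest (ws : List (List Int)) (i j : Nat) : Int := (ws.getD i []).getD j 0
def pvSetNest (ws : List (List Int)) (i j : Nat) (v : Int) : List (List Int) :=
  ws.set i ((ws.getD i []).set j v)

-- range(N) with N = len(s)-1 is ported as List.range (len-1) over Nat: exact, since
-- Python's range is empty for N ≤ 0 and Nat subtraction is 0 there; range(1,N) = List.range' 1 (N-1).
def solution (s : String) : Int :=
  let cs := s.toList
  let N := cs.length - 1
  let words : List (List Int) := List.replicate N (List.replicate N 0)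
  let p1 := (List.range N).foldl (fun st (j : Nat) =>
      let v := pvCalc (PySem.List.slice cs (some (j : Int)) (some ((j : Int) + 2)))
      (pvSetNest st.1 0 j v, st.2 + v)) (words, 0)
  let p2 := (List.range' 1 (N - 1)).foldl (fun st i =>
      (List.range N).foldl (fun st' j =>
        if i + j < N then
          let v := pvGetNest st'.1 (i - 1) j + pvGetNest st'.1 0 (i + j)
          (pvSetNest st'.1 i j v, st'.2 + v)
        else st') st) p1
  p2.2

-- ===== PORT B =====
def pvKeys : List Char := "qwertyuiopasdfghjklzxcvbnm.".toList

-- pos = {c: divmod(k, 9) for k, c in enumerate(keys)}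
def pvPos : PySem.Dict Char (Int × Int) :=
  (PySem.List.enumerate pvKeys 0).foldl
    (fun d p => d.insert p.2 (PySem.Int.floordiv p.1 9, PySem.Int.mod p.1 9)) PySem.Dict.empty

def solution_alt (s : String) : Int :=
  let cs := s.toList
  let N : Int := (cs.length : Int) - 1
  (PySem.List.enumerate (cs.zip (PySem.List.slice cs (some 1) none)) 0).foldl
    (fun total p =>
      let t := p.1
      let xp := pvPos.getD p.2.1 (0, 0)
      let yp := pvPos.getD p.2.2 (0, 0)
      let d := |xp.1 - yp.1| + |xp.2 - yp.2|
      total + d * (t + 1) * (N - t)) 0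

-- ===== PRECONDITION & SPEC =====
def Spec_solution (s : String) (out : Int) : Prop := out = solution_alt s
instance (s : String) (out : Int) : Decidable (Spec_solution s out) := by unfold Spec_solution; infer_instance

-- ===== CLAIM (what is proved, stated in full; the proofs are below) =====
def Claim_equal_solution : Prop := ∀ (s : String), Dom_solution s → Spec_solution s (solution s)


-- ===== LEMMAS AND PROOFS =====

-- flat list of the 27 keyboard cells in scan order, with their (row, col) coordinates
def pvCells : List (Char × (Int × Int)) := [('q', ((0 : Int), (0 : Int))), ('w', ((0 : Int), (1 : Int))), ('e', ((0 : Int), (2 : Int))), ('r', ((0 : Int), (3 : Int))), ('t', ((0 : Int), (4 : Int))), ('y', ((0 : Int), (5 : Int))), ('u', ((0 : Int), (6 : Int))), ('i', ((0 : Int), (7 : Int))), ('o', ((0 : Int), (8 : Int))), ('p', ((1 : Int), (0 : Int))), ('a', ((1 : Int), (1 : Int))), ('s', ((1 : Int), (2 : Int))), ('d', ((1 : Int), (3 : Int))), ('f', ((1 : Int), (4 : Int))), ('g', ((1 : Int), (5 : Int))), ('h', ((1 : Int), (6 : Int))), ('j', ((1 : Int), (7 : Int))), ('k', ((1 : Int),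 (8 : Int))), ('l', ((2 : Int), (0 : Int))), ('z', ((2 : Int), (1 : Int))), ('x', ((2 : Int), (2 : Int))), ('c', ((2 : Int), (3 : Int))), ('v', ((2 : Int), (4 : Int))), ('b', ((2 : Int), (5 : Int))), ('n', ((2 : Int), (6 : Int))), ('m', ((2 : Int), (7 : Int))), ('.', ((2 : Int), (8 : Int)))]

def pvAllKeys : List Char := ['q', 'w', 'e', 'r', 't', 'y', 'u', 'i', 'o', 'p', 'a', 's', 'd', 'f', 'g', 'h', 'j', 'k', 'l', 'z', 'x', 'c', 'v', 'b', 'n', 'm', '.']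

-- A's per-character scan (last match wins) over the flat cell list
def pvPosA (c : Char) : Int × Int :=
  pvCells.foldl (fun p kc => if c = kc.1 then kc.2 else p) ((0 : Int), (0 : Int))

-- B's per-character position
def pvP (c : Char) : Int × Int := pvPos.getD c ((0 : Int), (0 : Int))

-- distance of the adjacent pair starting at t
def pvD (cs : List Char) (t : Nat) : Int :=
  |(pvP (cs.getD t ' ')).1 - (pvP (cs.getD (t+1) ' ')).1| +
  |(pvP (cs.getD t ' ')).2 - (pvP (cs.getD (t+1) ' ')).2|

-- sum of adjacent distances of the substring s[j .. j+i+1]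
def pvW (cs : List Char) (i j : Nat) : Int := ∑ k ∈ Finset.range (i+1), pvD cs (j+k)

-- pointwise description of the n×n matrix `words`
def pvMat (n : Nat) (ws : List (List Int)) (f : Nat → Nat → Int) : Prop :=
  ws.length = n ∧ (∀ i, i < n → (ws.getD i []).length = n) ∧
    (∀ i j, i < n → j < n → pvGetNest ws i j = f i j)

theorem pvPosA_eq_pvP (c : Char) : pvPosA c = pvP c := by
  by_cases hc : c ∈ pvAllKeys
  · simp only [pvAllKeys, List.mem_cons, List.not_mem_nil, or_false] at hc
    rcases hc with rfl|rfl|rfl|rfl|rfl|rfl|rfl|rfl|rfl|rfl|rfl|rfl|rfl|rfl|rfl|rfl|rfl|rfl|rfl|rfl|rfl|rfl|rfl|rfl|rfl|rfl|rfl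
    all_goals decide
  · simp only [pvAllKeys, List.mem_cons, List.not_mem_nil, or_false, not_or] at hc
    obtain ⟨h1, h2, h3, h4, h5, h6, h7, h8, h9, h10, h11, h12, h13, h14, h15, h16, h17, h18, h19, h20, h21, h22, h23, h24, h25, h26, h27⟩ := hc
    have hA : pvPosA c = ((0 : Int), (0 : Int)) := by
      simp [pvPosA, pvCells, h1, h2, h3, h4, h5, h6, h7, h8, h9, h10, h11, h12, h13, h14, h15, h16, h17, h18, h19, h20, h21, h22, h23, h24, h25, h26, h27]
    have hB : pvP c = ((0 : Int), (0 : Int)) := by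
      simp [pvP, pvPos, pvKeys, PySem.List.enumerate, PySem.Dict.getD_insert, PySem.Dict.getD_empty, h1, h2, h3, h4, h5, h6, h7, h8, h9, h10, h11, h12, h13, h14, h15, h16, h17, h18, h19, h20, h21, h22, h23, h24, h25, h26, h27]
    rw [hA, hB]

theorem pvCalc_eq (t : List Char) :
    pvCalc t = |(pvPosA (t.getD 0 ' ')).1 - (pvPosA (t.getD 1 ' ')).1| +
               |(pvPosA (t.getD 0 ' ')).2 - (pvPosA (t.getD 1 ' ')).2| := by
  have key : ∀ c0 c1 : Char,
      (List.range 3).foldl (fun st i =>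
        (List.range 9).foldl (fun st j =>
          ((if c0 = (pvKeyboard.getD i []).getD j ' ' then ((i : Int), (j : Int)) else st.1),
           (if c1 = (pvKeyboard.getD i []).getD j ' ' then ((i : Int), (j : Int)) else st.2))) st)
        (((0 : Int), (0 : Int)), ((0 : Int), (0 : Int)))
      = (pvPosA c0, pvPosA c1) := by
    intro c0 c1
    rfl
  show (fun st : (Int × Int) × (Int × Int) => |st.1.1 - st.2.1| + |st.1.2 - st.2.2|)
      ((List.range 3).foldl _ (((0 : Int), (0 : Int)), ((0 : Int), (0 : Int)))) = _
  rw [key (t.getD 0 ' ') (t.getD 1 ' ')]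

theorem pvCalc_slice (cs : List Char) (j : Nat) (_h : j + 1 < cs.length) :
    pvCalc (PySem.List.slice cs (some (j : Int)) (some ((j : Int) + 2))) = pvD cs j := by
  rw [pvCalc_eq]
  have hsl : PySem.List.slice cs (some (j : Int)) (some ((j : Int) + 2)) = (cs.drop j).take 2 := by
    rw [show ((j : Int) + 2) = ((j : Int) + ((2 : Nat) : Int)) by norm_num]
    exact PySem.List.slice_natCast_add cs j 2
  have h0 : ((cs.drop j).take 2).getD 0 ' ' = cs.getD j ' ' := by
    simp [List.getD_eq_getElem?_getD, List.getElem?_drop]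
  have h1 : ((cs.drop j).take 2).getD 1 ' ' = cs.getD (j+1) ' ' := by
    simp [List.getD_eq_getElem?_getD, List.getElem?_drop, Nat.add_comm j 1]
  rw [hsl, h0, h1, pvPosA_eq_pvP, pvPosA_eq_pvP]
  rfl

theorem pvW_zero (cs : List Char) (j : Nat) : pvW cs 0 j = pvD cs j := by
  simp [pvW]

theorem pvW_succ (cs : List Char) (i j : Nat) (hi : 1 ≤ i) :
    pvW cs i j = pvW cs (i-1) j + pvD cs (i+j) := by
  obtain ⟨i, rfl⟩ : ∃ i', i = i' + 1 := ⟨i - 1, by omega⟩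
  simp only [pvW, Finset.sum_range_succ, Nat.add_sub_cancel]
  congr 2
  omega

theorem pvMat_congr {n : Nat} {ws : List (List Int)} {f g : Nat → Nat → Int}
    (h : pvMat n ws f) (hfg : ∀ i j, i < n → j < n → f i j = g i j) : pvMat n ws g := by
  exact ⟨h.1, h.2.1, fun i j hi hj => (h.2.2 i j hi hj).trans (hfg i j hi hj)⟩

theorem pvMat_replicate (n : Nat) :
    pvMat n (List.replicate n (List.replicate n (0 : Int))) (fun _ _ => 0) := by
  refine ⟨by simp, fun i hi => ?_, fun i j hi hj => ?_⟩
  · simp [List.getD_eq_getElem?_getD, hi]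
  · simp [pvGetNest, List.getD_eq_getElem?_getD, hi, hj]

theorem pvMat_set {n : Nat} {ws : List (List Int)} {f : Nat → Nat → Int}
    (h : pvMat n ws f) {i j : Nat} (hi : i < n) (hj : j < n) (v : Int) :
    pvMat n (pvSetNest ws i j v)
      (fun i' j' => if i' = i ∧ j' = j then v else f i' j') := by
  obtain ⟨hlen, hrows, hget⟩ := h
  have hiw : i < ws.length := by omega
  have hrow : ∀ i', (pvSetNest ws i j v).getD i' [] =
      if i' = i then (ws.getD i []).set j v else ws.getD i' [] := by
    intro i'
    by_cases hii : i' = i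
    · subst hii
      simp only [pvSetNest, List.getD_eq_getElem?_getD] at hiw ⊢
      simp [List.getElem?_set_eq_of_lt _ hiw]
    · simp [pvSetNest, List.getD_eq_getElem?_getD, List.getElem?_set_ne (by omega : i ≠ i'), hii]
  refine ⟨by simp [pvSetNest, hlen], fun i' hi' => ?_, fun i' j' hi' hj' => ?_⟩
  · rw [hrow i']
    by_cases hii : i' = i
    · rw [if_pos hii, List.length_set]; exact hrows _ hi
    · rw [if_neg hii]; exact hrows _ hi'
  · show pvGetNest _ i' j' = _
    unfold pvGetNest
    rw [hrow i']
    by_cases hii : i' = i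
    · subst hii
      have hjrow : j < (ws.getD i' []).length := by rw [hrows _ hi']; omega
      by_cases hjj : j' = j
      · subst hjj
        simp only [List.getD_eq_getElem?_getD] at hjrow ⊢
        simp [List.getElem?_set_eq_of_lt _ hjrow]
      · have := hget i' j' hi' hj'
        simp only [pvGetNest, List.getD_eq_getElem?_getD] at this
        simp only [List.getD_eq_getElem?_getD, if_true]
        rw [List.getElem?_set_ne (by omega : j ≠ j')]
        simp [this, hjj]
    · have := hget i' j' hi' hj'
      simp only [pvGetNest, List.getD_eq_getElem?_getD] at this
      simp [this, hii]

-- Σ_{j<M} (if j < L then g j else 0) = Σ_{j<L} g j   (L ≤ M)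
theorem pv_sum_prefix (g : Nat → Int) (M L : Nat) (hLM : L ≤ M) :
    ∑ j ∈ Finset.range M, (if j < L then g j else 0) = ∑ j ∈ Finset.range L, g j := by
  have hsub : Finset.range L ⊆ Finset.range M := by
    intro x hx; simp only [Finset.mem_range] at *; omega
  rw [← Finset.sum_subset hsub (fun x _ hx => by
    simp only [Finset.mem_range] at hx
    simp [hx])]
  exact Finset.sum_congr rfl (fun j hj => if_pos (Finset.mem_range.1 hj))

-- ===== phase 1 =====
theorem pv_phase1 (cs : List Char) (n : Nat) (hn : n = cs.length - 1) :
    ∀ m, m ≤ n → ∀ (ws : List (List Int)) (a : Int) (f : Nat → Nat → Int), pvMat n ws f →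
    ∃ ws', (List.range m).foldl (fun st (j : Nat) =>
        let v := pvCalc (PySem.List.slice cs (some (j : Int)) (some ((j : Int) + 2)))
        (pvSetNest st.1 0 j v, st.2 + v)) (ws, a)
      = (ws', a + ∑ j ∈ Finset.range m, pvD cs j) ∧
      pvMat n ws' (fun i' j' => if i' = 0 ∧ j' < m then pvD cs j' else f i' j') := by
  intro m
  induction m with
  | zero =>
    intro _ ws a f h
    exact ⟨ws, by simp, pvMat_congr h (by intro i j hi hj; simp)⟩
  | succ m ih =>
    intro hm ws a f h
    obtain ⟨ws', heq, hmat⟩ := ih (by omega) ws a f h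
    rw [List.range_succ, List.foldl_append, heq]
    simp only [List.foldl_cons, List.foldl_nil]
    have hv : pvCalc (PySem.List.slice cs (some (m : Int)) (some ((m : Int) + 2))) = pvD cs m :=
      pvCalc_slice cs m (by omega)
    refine ⟨pvSetNest ws' 0 m (pvD cs m), ?_, ?_⟩
    · rw [hv, Finset.sum_range_succ]
      simp [add_assoc]
    · refine pvMat_congr (pvMat_set hmat (by omega) (by omega) (pvD cs m)) ?_
      intro i' j' hi' hj'
      by_cases h1 : i' = 0
      · subst h1
        by_cases h2 : j' = m
        · subst h2; simp
        · simp only [true_and]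
          rw [if_neg (by omega), if_congr (by omega : (j' < m) ↔ (j' < m + 1)) rfl rfl]
      · simp [h1]

-- ===== phase 2, inner loop (row i) =====
theorem pv_inner (cs : List Char) (n i : Nat) (hi1 : 1 ≤ i) (hin : i < n) :
    ∀ m, m ≤ n → ∀ (ws : List (List Int)) (a : Int) (f : Nat → Nat → Int), pvMat n ws f →
    (∀ j, j < n → f (i-1) j = if (i-1) + j < n then pvW cs (i-1) j else 0) →
    (∀ j, j < n → f 0 j = pvD cs j) →
    ∃ ws', (List.range m).foldl (fun st' (j : Nat) =>
        if i + j < n then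
          (pvSetNest st'.1 i j (pvGetNest st'.1 (i - 1) j + pvGetNest st'.1 0 (i + j)),
           st'.2 + (pvGetNest st'.1 (i - 1) j + pvGetNest st'.1 0 (i + j)))
        else st') (ws, a)
      = (ws', a + ∑ j ∈ Finset.range m, (if i + j < n then pvW cs i j else 0)) ∧
      pvMat n ws' (fun i' j' => if i' = i ∧ j' < m ∧ i + j' < n then pvW cs i j' else f i' j') := by
  intro m
  induction m with
  | zero =>
    intro _ ws a f h _ _
    exact ⟨ws, by simp, pvMat_congr h (by intro i' j' _ _; simp)⟩
  | succ m ih =>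
    intro hm ws a f h hrow hrow0
    obtain ⟨ws', heq, hmat⟩ := ih (by omega) ws a f h hrow hrow0
    rw [List.range_succ, List.foldl_append, heq]
    simp only [List.foldl_cons, List.foldl_nil]
    by_cases hc : i + m < n
    · rw [if_pos hc]
      have hg1 : pvGetNest ws' (i - 1) m = pvW cs (i-1) m := by
        rw [hmat.2.2 (i-1) m (by omega) (by omega)]
        beta_reduce
        rw [if_neg (by omega), hrow m (by omega), if_pos (by omega)]
      have hg0 : pvGetNest ws' 0 (i + m) = pvD cs (i + m) := by
        rw [hmat.2.2 0 (i+m) (by omega) (by omega)]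
        beta_reduce
        rw [if_neg (by omega), hrow0 (i+m) (by omega)]
      have hv : pvGetNest ws' (i - 1) m + pvGetNest ws' 0 (i + m) = pvW cs i m := by
        rw [hg1, hg0, pvW_succ cs i m hi1]
      refine ⟨pvSetNest ws' i m (pvW cs i m), ?_, ?_⟩
      · rw [hv, Finset.sum_range_succ, if_pos hc]
        simp [add_assoc]
      · refine pvMat_congr (pvMat_set hmat (by omega) (by omega) (pvW cs i m)) ?_
        intro i' j' hi' hj'
        by_cases h1 : i' = i
        · by_cases h2 : j' = m
          · simp [h1, h2, hc]
          · simp only [h1, true_and]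
            rw [if_neg h2,
              if_congr (by omega : (j' < m ∧ i + j' < n) ↔ (j' < m + 1 ∧ i + j' < n)) rfl rfl]
        · simp [h1]
    · rw [if_neg hc]
      refine ⟨ws', ?_, ?_⟩
      · rw [Finset.sum_range_succ, if_neg hc, add_zero]
      · refine pvMat_congr hmat ?_
        intro i' j' hi' hj'
        refine if_congr ?_ rfl rfl
        constructor
        · intro hx; exact ⟨hx.1, by omega, hx.2.2⟩
        · intro hx
          refine ⟨hx.1, ?_, hx.2.2⟩
          rcases hx with ⟨hxi, hxj, hxn⟩
          omega

-- ===== phase 2, outer loop =====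
theorem pv_outer (cs : List Char) (n : Nat) :
    ∀ K, K ≤ n - 1 → ∀ (ws : List (List Int)) (a : Int),
    pvMat n ws (fun i' j' => if i' = 0 ∧ j' < n then pvD cs j' else 0) →
    ∃ ws', (List.range' 1 K).foldl (fun st (i : Nat) =>
        (List.range n).foldl (fun st' (j : Nat) =>
          if i + j < n then
            (pvSetNest st'.1 i j (pvGetNest st'.1 (i - 1) j + pvGetNest st'.1 0 (i + j)),
             st'.2 + (pvGetNest st'.1 (i - 1) j + pvGetNest st'.1 0 (i + j)))
          else st') st) (ws, a)
      = (ws', a + ∑ i ∈ Finset.Ico 1 (K+1), ∑ j ∈ Finset.range (n - i), pvW cs i j) ∧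
      pvMat n ws' (fun i' j' => if i' ≤ K ∧ i' + j' < n then pvW cs i' j' else 0) := by
  intro K
  induction K with
  | zero =>
    intro _ ws a h
    refine ⟨ws, by simp, pvMat_congr h ?_⟩
    intro i' j' hi' hj'
    by_cases h0 : i' = 0
    · subst h0
      rw [if_congr (by omega : (0 = 0 ∧ j' < n) ↔ (0 ≤ 0 ∧ 0 + j' < n)) (pvW_zero cs j').symm rfl]
    · simp [h0]
  | succ K ih =>
    intro hK ws a h
    obtain ⟨wsK, heq, hmat⟩ := ih (by omega) ws a h
    rw [List.range'_concat, List.foldl_append, heq]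
    simp only [List.foldl_cons, List.foldl_nil, one_mul]
    have hinner := pv_inner cs n (1 + K) (by omega) (by omega) n (le_refl n) wsK
      (a + ∑ i ∈ Finset.Ico 1 (K+1), ∑ j ∈ Finset.range (n - i), pvW cs i j)
      (fun i' j' => if i' ≤ K ∧ i' + j' < n then pvW cs i' j' else 0) hmat ?_ ?_
    · obtain ⟨ws', heq', hmat'⟩ := hinner
      refine ⟨ws', ?_, ?_⟩
      · rw [heq']
        have hsum : ∑ j ∈ Finset.range n, (if 1 + K + j < n then pvW cs (1+K) j else 0)
            = ∑ j ∈ Finset.range (n - (K+1)), pvW cs (K+1) j := by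
          rw [show (1+K) = (K+1) by omega]
          calc ∑ j ∈ Finset.range n, (if K + 1 + j < n then pvW cs (K+1) j else 0)
              = ∑ j ∈ Finset.range n, (if j < n - (K+1) then pvW cs (K+1) j else 0) :=
                Finset.sum_congr rfl (fun j _ => if_congr (by omega) rfl rfl)
            _ = ∑ j ∈ Finset.range (n - (K+1)), pvW cs (K+1) j :=
                pv_sum_prefix _ n (n - (K+1)) (by omega)
        rw [hsum, Finset.sum_Ico_succ_top (by omega : 1 ≤ K + 1)]
        simp [add_assoc]
      · refine pvMat_congr hmat' ?_
        intro i' j' hi' hj'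
        by_cases h1 : i' = 1 + K
        · simp only [h1, true_and]
          by_cases h2 : 1 + K + j' < n
          · rw [if_pos (by omega : j' < n ∧ 1 + K + j' < n),
              if_pos (by omega : 1 + K ≤ K + 1 ∧ 1 + K + j' < n)]
          · rw [if_neg (by omega), if_neg (by omega), if_neg (by omega)]
        · rw [if_neg (by omega)]
          exact if_congr (by omega) rfl rfl
    · intro j hj
      beta_reduce
      rw [show (1 + K - 1) = K by omega]
      by_cases h2 : K + j < n
      · rw [if_pos (by omega), if_pos (by omega)]
      · rw [if_neg (by omega), if_neg (by omega)]
    · intro j hj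
      beta_reduce
      rw [if_pos (by omega), pvW_zero]

-- ===== A as a double sum =====
theorem pv_A_eq (s : String) :
    solution s = ∑ i ∈ Finset.range (s.toList.length - 1),
        ∑ j ∈ Finset.range ((s.toList.length - 1) - i), pvW s.toList i j := by
  have h0 := pvMat_replicate (s.toList.length - 1)
  obtain ⟨ws1, h1, hm1⟩ := pv_phase1 s.toList (s.toList.length - 1) rfl
    (s.toList.length - 1) (le_refl _)
    (List.replicate (s.toList.length - 1) (List.replicate (s.toList.length - 1) (0 : Int)))
    0 (fun _ _ => 0) h0
  obtain ⟨ws2, h2, hm2⟩ := pv_outer s.toList (s.toList.length - 1) ((s.toList.length - 1) - 1)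
    (le_refl _) ws1 (0 + ∑ j ∈ Finset.range (s.toList.length - 1), pvD s.toList j) hm1
  have hsol : solution s = ((List.range' 1 ((s.toList.length - 1) - 1)).foldl
      (fun st (i : Nat) => (List.range (s.toList.length - 1)).foldl (fun st' (j : Nat) =>
        if i + j < (s.toList.length - 1) then
          (pvSetNest st'.1 i j (pvGetNest st'.1 (i - 1) j + pvGetNest st'.1 0 (i + j)),
           st'.2 + (pvGetNest st'.1 (i - 1) j + pvGetNest st'.1 0 (i + j)))
        else st') st)
      ((List.range (s.toList.length - 1)).foldl (fun st (j : Nat) =>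
        let v := pvCalc (PySem.List.slice s.toList (some (j : Int)) (some ((j : Int) + 2)))
        (pvSetNest st.1 0 j v, st.2 + v))
        (List.replicate (s.toList.length - 1) (List.replicate (s.toList.length - 1) (0 : Int)),
         0))).2 := rfl
  rw [hsol, h1, h2]
  by_cases hn : s.toList.length - 1 = 0
  · simp only [hn]
    simp
  · rw [show (s.toList.length - 1) - 1 + 1 = s.toList.length - 1 by omega]
    have hsplit : ∀ (F : Nat → Int) (n : Nat), 0 < n →
        ∑ i ∈ Finset.range n, F i = F 0 + ∑ i ∈ Finset.Ico 1 n, F i := by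
      intro F n hn0
      rw [Finset.range_eq_Ico]
      exact Finset.sum_eq_sum_Ico_succ_bot hn0 F
    conv_rhs => rw [hsplit _ _ (by omega : 0 < s.toList.length - 1)]
    have hz : ∑ j ∈ Finset.range ((s.toList.length - 1) - 0), pvW s.toList 0 j
        = ∑ j ∈ Finset.range (s.toList.length - 1), pvD s.toList j := by
      rw [show (s.toList.length - 1) - 0 = s.toList.length - 1 by omega]
      exact Finset.sum_congr rfl (fun j _ => pvW_zero s.toList j)
    rw [hz]
    ring

-- ===== B as a weighted sum =====
theorem pv_sum_enumerate {α : Type} (g : Int → α → Int) (dflt : α) :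
    ∀ (l : List α) (st : Int),
    ((PySem.List.enumerate l st).map (fun p => g p.1 p.2)).sum
      = ∑ k ∈ Finset.range l.length, g (st + k) (l.getD k dflt) := by
  intro l
  induction l with
  | nil => simp [PySem.List.enumerate_nil]
  | cons x xs ih =>
    intro st
    rw [PySem.List.enumerate_cons]
    simp only [List.map_cons, List.sum_cons, List.length_cons, ih (st + 1),
      Finset.sum_range_succ']
    rw [add_comm]
    congr 1
    · refine Finset.sum_congr rfl (fun k _ => ?_)
      congr 1
      push_cast
      ring
    · simp

theorem pv_B_eq (s : String) :
    solution_alt s = ∑ t ∈ Finset.range (s.toList.length - 1),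
        pvD s.toList t * ((t : Int) + 1) * (((s.toList.length - 1 : Nat) : Int) - (t : Int)) := by
  have e1 : solution_alt s = (PySem.List.enumerate
      (s.toList.zip (PySem.List.slice s.toList (some 1) none)) 0).foldl
      (fun acc p => acc +
        (|(pvP p.2.1).1 - (pvP p.2.2).1| + |(pvP p.2.1).2 - (pvP p.2.2).2|) *
          (p.1 + 1) * (((s.toList.length : Int) - 1) - p.1)) 0 := rfl
  rw [e1, PySem.List.slice_from_one, PySem.List.foldl_add, zero_add,
    pv_sum_enumerate (fun (t : Int) (pr : Char × Char) =>
      (|(pvP pr.1).1 - (pvP pr.2).1| + |(pvP pr.1).2 - (pvP pr.2).2|) *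
        (t + 1) * (((s.toList.length : Int) - 1) - t)) (' ', ' ')]
  have hlen : (s.toList.zip s.toList.tail).length = s.toList.length - 1 := by
    simp [List.length_zip, List.length_tail]
  rw [hlen]
  refine Finset.sum_congr rfl (fun k hk => ?_)
  have hk' : k < s.toList.length - 1 := Finset.mem_range.1 hk
  have hkz : k < (s.toList.zip s.toList.tail).length := by omega
  have hget : (s.toList.zip s.toList.tail).getD k (' ', ' ')
      = (s.toList.getD k ' ', s.toList.getD (k+1) ' ') := by
    rw [List.getD_eq_getElem?_getD, List.getElem?_eq_getElem hkz]
    rw [Option.getD_some, List.getElem_zip (h := hkz), List.getElem_tail]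
    congr 1
    · exact (List.getD_eq_getElem _ _ (by omega)).symm
    · exact (List.getD_eq_getElem _ _ (by omega)).symm
  rw [hget]
  show (|(pvP (s.toList.getD k ' ')).1 - (pvP (s.toList.getD (k+1) ' ')).1| +
        |(pvP (s.toList.getD k ' ')).2 - (pvP (s.toList.getD (k+1) ' ')).2|) *
        ((0 : Int) + (k : Int) + 1) * (((s.toList.length : Int) - 1) - ((0 : Int) + (k : Int)))
      = pvD s.toList k * ((k : Int) + 1) * (((s.toList.length - 1 : Nat) : Int) - (k : Int))
  unfold pvD
  have hcast : ((s.toList.length : Int) - 1) = (((s.toList.length - 1 : Nat) : Int)) := by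
    have : 1 ≤ s.toList.length := by omega
    omega
  rw [hcast]
  ring

-- ===== the counting identity =====
theorem pv_J (d : Nat → Int) : ∀ n : Nat,
    ∑ i ∈ Finset.range (n+1), ∑ k ∈ Finset.range (i+1), d (n - i + k)
      = ∑ t ∈ Finset.range (n+1), ((t : Int) + 1) * d t := by
  have hIco : ∀ (n i : Nat), i ≤ n →
      ∑ k ∈ Finset.range (i+1), d (n - i + k) = ∑ t ∈ Finset.Ico (n-i) (n+1), d t := by
    intro n i hi
    rw [Finset.sum_Ico_eq_sum_range, show (n+1) - (n-i) = i+1 by omega]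
  intro n
  induction n with
  | zero => simp
  | succ n ih =>
    have step1 : ∑ i ∈ Finset.range (n+2), ∑ k ∈ Finset.range (i+1), d (n+1 - i + k)
        = ∑ i ∈ Finset.range (n+2), ∑ t ∈ Finset.Ico (n+1-i) (n+2), d t :=
      Finset.sum_congr rfl (fun i hi => hIco (n+1) i (by
        have := Finset.mem_range.1 hi; omega))
    have step2 : ∑ i ∈ Finset.range (n+2), ∑ t ∈ Finset.Ico (n+1-i) (n+2), d t
        = ∑ i ∈ Finset.range (n+2), (∑ t ∈ Finset.Ico (n+1-i) (n+1), d t + d (n+1)) :=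
      Finset.sum_congr rfl (fun i _ =>
        Finset.sum_Ico_succ_top (by omega : n+1-i ≤ n+1) d)
    have step3 : ∑ i ∈ Finset.range (n+2), (∑ t ∈ Finset.Ico (n+1-i) (n+1), d t + d (n+1))
        = (∑ i ∈ Finset.range (n+2), ∑ t ∈ Finset.Ico (n+1-i) (n+1), d t)
          + ((n : Int) + 2) * d (n+1) := by
      rw [Finset.sum_add_distrib, Finset.sum_const, Finset.card_range]
      ring
    have step4 : ∑ i ∈ Finset.range (n+2), ∑ t ∈ Finset.Ico (n+1-i) (n+1), d t
        = ∑ i ∈ Finset.range (n+1), ∑ t ∈ Finset.Ico (n-i) (n+1), d t := by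
      rw [Finset.sum_range_succ']
      have h0 : ∑ t ∈ Finset.Ico (n+1-0) (n+1), d t = 0 := by
        rw [show n+1-0 = n+1 by omega]
        simp
      rw [h0, add_zero]
      exact Finset.sum_congr rfl (fun i _ => by rw [show n+1-(i+1) = n-i by omega])
    have step5 : ∑ i ∈ Finset.range (n+1), ∑ t ∈ Finset.Ico (n-i) (n+1), d t
        = ∑ t ∈ Finset.range (n+1), ((t : Int) + 1) * d t := by
      rw [← ih]
      exact Finset.sum_congr rfl (fun i hi => (hIco n i (by
        have := Finset.mem_range.1 hi; omega)).symm)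
    rw [step1, step2, step3, step4, step5,
      Finset.sum_range_succ (f := fun t => ((t : Int) + 1) * d t) (n := n+1)]
    push_cast
    ring

theorem pv_ident (d : Nat → Int) : ∀ n : Nat,
    ∑ i ∈ Finset.range n, ∑ j ∈ Finset.range (n - i), (∑ k ∈ Finset.range (i+1), d (j+k))
      = ∑ t ∈ Finset.range n, d t * ((t : Int) + 1) * ((n : Int) - (t : Int)) := by
  intro n
  induction n with
  | zero => simp
  | succ n ih =>
    have hL : ∑ i ∈ Finset.range (n+1), ∑ j ∈ Finset.range ((n+1) - i),
          (∑ k ∈ Finset.range (i+1), d (j+k))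
        = (∑ i ∈ Finset.range n, ∑ j ∈ Finset.range (n - i),
            (∑ k ∈ Finset.range (i+1), d (j+k)))
          + ∑ i ∈ Finset.range (n+1), ∑ k ∈ Finset.range (i+1), d ((n-i)+k) := by
      rw [Finset.sum_range_succ, show (n+1) - n = 1 by omega, Finset.sum_range_one]
      have hmid : ∀ i ∈ Finset.range n,
          ∑ j ∈ Finset.range ((n+1) - i), (∑ k ∈ Finset.range (i+1), d (j+k))
            = ∑ j ∈ Finset.range (n - i), (∑ k ∈ Finset.range (i+1), d (j+k))
              + ∑ k ∈ Finset.range (i+1), d ((n-i)+k) := by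
        intro i hi
        have hi' := Finset.mem_range.1 hi
        rw [show (n+1) - i = (n-i)+1 by omega, Finset.sum_range_succ]
      rw [Finset.sum_congr rfl hmid, Finset.sum_add_distrib,
        Finset.sum_range_succ (f := fun i => ∑ k ∈ Finset.range (i+1), d ((n-i)+k)),
        show n - n = 0 by omega]
      ring
    rw [hL, ih, pv_J d n]
    have hR : ∑ t ∈ Finset.range (n+1), d t * ((t : Int) + 1) * (((n+1 : Nat) : Int) - (t : Int))
        = (∑ t ∈ Finset.range n, d t * ((t : Int) + 1) * ((n : Int) - (t : Int)))
          + ∑ t ∈ Finset.range (n+1), ((t : Int) + 1) * d t := by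
      have hsplit : ∀ t ∈ Finset.range (n+1),
          d t * ((t : Int) + 1) * (((n+1 : Nat) : Int) - (t : Int))
            = d t * ((t : Int) + 1) * ((n : Int) - (t : Int)) + ((t : Int) + 1) * d t := by
        intro t _
        push_cast
        ring
      rw [Finset.sum_congr rfl hsplit, Finset.sum_add_distrib, Finset.sum_range_succ
        (f := fun t => d t * ((t : Int) + 1) * ((n : Int) - (t : Int)))]
      simp
    rw [hR]

-- ===== VERDICT (by name: the statement is the Claim_ definition above) =====
theorem solution_spec : Claim_equal_solution := by
  intro s _
  show solution s = solution_alt s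
  rw [pv_A_eq, pv_B_eq]
  have := pv_ident (pvD s.toList) (s.toList.length - 1)
  simpa [pvW] using this
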